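-- pv_equiv track=rewrite | github.com/Varun-D-Kalra/2026-coding-log | DSA/linked-list/linked-list-4.py | minMergeCost
-- ===== SOURCE A (Python) =====
-- from typing import List
--
-- def minMergeCost(lists: List[List[int]]) -> int:
--
--     if len(lists) == 1:
--         k = len(lists[0])
--         res = k
--         if len(lists[0]) % 2 == 0:
--             median = lists[0][(len(lists[0])//2) - 1]
--         else:
--             median = lists[0][len(lists[0])//2]
--
--         return res + median
--
--
--     def median(a): # pass lists in function
--         if len(a) % 2 != 0:
--             median_a = a[len(a) // 2]
--         else:
--             median_a = a[(len(a) // 2) - 1]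
--
--         return median_a
--
--     def merge(a, b):
--
--         i, j = 0, 0
--         res = []
--
--         while i < len(a) and j < len(b):
--
--             if a[i] <= b[j]:
--                 res.append(a[i])
--                 i += 1
--
--             else:
--                 res.append(b[j])
--                 j += 1
--
--         if i < len(a):
--             res.extend(a[i:])
--         else:
--             res.extend(b[j:])
--
--         return res
--
--
--
--     cost = 0
--     while len(lists) > 1:
--         m1 = median(lists[0])
--         m2 = median(lists[1])
--         cost += len(lists[0]) + len(lists[1]) + abs(m1 - m2)
--         res = merge(lists[0], lists[1])
--
--         lists.pop(0)
--         lists.pop(0)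
--
--         lists.insert(0, res)
--
--
--     return cost
-- ===== SOURCE B (Python) =====
-- from typing import List
--
-- def minMergeCost(lists: List[List[int]]) -> int:
--     def med(a):
--         return a[(len(a) - 1) // 2]
--
--     if not lists:
--         return 0
--     if len(lists) == 1:
--         return len(lists[0]) + med(lists[0])
--
--     k = len(lists)
--     # The length component of the cost never depends on the merge contents:
--     # lists[j] is paid once per merge it takes part in, i.e. (k-1-j) times
--     # while sitting inside the growing prefix, plus once as the incoming list.
--     length_part = sum(len(l) * (k - 1 - j + (1 if j else 0))
--                       for j, l in enumerate(lists))
--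
--     def merge(a, b):
--         ra, rb = a[::-1], b[::-1]
--         out = []
--         while ra and rb:
--             out.append(ra.pop() if ra[-1] <= rb[-1] else rb.pop())
--         out.extend(reversed(ra if ra else rb))
--         return out
--
--     med_part = 0
--     acc = lists[0]
--     for nxt in lists[1:]:
--         med_part += abs(med(acc) - med(nxt))
--         acc = merge(acc, nxt)
--     return length_part + med_part
-- ===== Notes on version B (the rewrite author's own statement) =====
-- stated objective: alternative
-- what changed: B decomposes the cost: the length component is computed in closed form as a weighted sum over the input lists (each list weighted by how many merges it takes part in), so no per-step length of the growing accumulator is ever tracked, and only the absolute median differences are accumulated along the prefix merges, which are done on reversed stacks; A instead pays lengths and median gaps together inside one while/pop/insert loop that mutates the input list in place (B does not mutate it).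
import Mathlib
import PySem

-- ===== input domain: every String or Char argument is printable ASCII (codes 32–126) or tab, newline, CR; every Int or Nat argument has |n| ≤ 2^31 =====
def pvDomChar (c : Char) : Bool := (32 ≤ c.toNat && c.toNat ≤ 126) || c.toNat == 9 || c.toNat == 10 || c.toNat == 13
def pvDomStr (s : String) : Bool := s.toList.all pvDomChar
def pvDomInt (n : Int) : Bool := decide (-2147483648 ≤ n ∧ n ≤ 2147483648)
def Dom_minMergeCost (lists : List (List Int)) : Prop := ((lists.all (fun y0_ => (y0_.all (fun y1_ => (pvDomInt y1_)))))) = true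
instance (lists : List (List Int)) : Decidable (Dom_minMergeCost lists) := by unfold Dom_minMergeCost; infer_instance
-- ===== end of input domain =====

-- B splits the cost into a closed-form weighted sum of the input lengths (no per-step length
-- bookkeeping) plus a separate accumulation of the median differences along the prefix merges,
-- with the merge done on reversed stacks; A instead pays lengths and median gaps together inside
-- one while/pop/insert mutation loop. A mutates its argument list in place and B does not: the
-- equivalence proved here is about the return value only. Same asymptotic cost (objective: alternative).

-- ===== PORT A =====
-- Python helper `median(a)`
def aMedian (a : List Int) : Int :=
  if PySem.Int.mod (a.length : Int) 2 ≠ 0 then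
    (PySem.List.pyGet? a (PySem.Int.floordiv (a.length : Int) 2)).getD 0
  else
    (PySem.List.pyGet? a (PySem.Int.floordiv (a.length : Int) 2 - 1)).getD 0

-- Python helper `merge(a, b)` (two-pointer while loop, then extend with the leftover tail)
def aMerge : List Int → List Int → List Int
  | x :: xs, y :: ys =>
      if x ≤ y then x :: aMerge xs (y :: ys) else y :: aMerge (x :: xs) ys
  | [], ys => ys
  | x :: xs, [] => x :: xs
termination_by a b => a.length + b.length

-- the `while len(lists) > 1` loop; `lists.pop(0); lists.pop(0); lists.insert(0, res)`
-- becomes replacing the first two lists by their merge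
def aLoop : List (List Int) → Int → Int
  | a :: b :: rest, cost =>
      aLoop (aMerge a b :: rest)
        (cost + (a.length : Int) + (b.length : Int) + |aMedian a - aMedian b|)
  | [], cost => cost
  | [_], cost => cost
termination_by l _ => l.length

def minMergeCost (lists : List (List Int)) : Int :=
  if lists.length = 1 then
    let a := (PySem.List.pyGet? lists 0).getD []
    (a.length : Int) +
      (if PySem.Int.mod (a.length : Int) 2 = 0 then
        (PySem.List.pyGet? a (PySem.Int.floordiv (a.length : Int) 2 - 1)).getD 0
      else
        (PySem.List.pyGet? a (PySem.Int.floordiv (a.length : Int) 2)).getD 0)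
  else
    aLoop lists 0

-- ===== PORT B =====
-- Source B `med(a)`: a[(len(a) - 1) // 2]
def bMed (a : List Int) : Int :=
  (PySem.List.pyGet? a (PySem.Int.floordiv ((a.length : Int) - 1) 2)).getD 0

-- Source B length_part: sum(len(l) * (k-1-j + (1 if j else 0)) for j, l in enumerate(lists))
def bLenPart (k : Int) (lists : List (List Int)) : Int :=
  (PySem.List.enumerate lists 0).foldl
    (fun s jl => s + (jl.2.length : Int) * (k - 1 - jl.1 + (if jl.1 ≠ 0 then 1 else 0))) 0

-- Source B merge: Python keeps ra = a[::-1], rb = b[::-1] as stacks and pops from their ends;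
-- popping the end of the reversed copy consumes the original list from the front, so the
-- remaining stack contents are represented here in original order (representation only).
def bMerge (out : List Int) : List Int → List Int → List Int
  | x :: xs, y :: ys =>
      if x ≤ y then bMerge (out ++ [x]) xs (y :: ys) else bMerge (out ++ [y]) (x :: xs) ys
  | ra, rb => out ++ (if ra ≠ [] then ra else rb)
termination_by ra rb => ra.length + rb.length

-- Source B `for nxt in lists[1:]`: med_part += |med(acc) - med(nxt)|; acc = merge(acc, nxt)
def bMedLoop : List Int → Int → List (List Int) → Int
  | _, m, [] => m
  | acc, m, nxt :: rest => bMedLoop (bMerge [] acc nxt) (m + |bMed acc - bMed nxt|) rest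

def minMergeCost_alt (lists : List (List Int)) : Int :=
  if lists = [] then 0
  else if lists.length = 1 then
    let a := (PySem.List.pyGet? lists 0).getD []
    (a.length : Int) + bMed a
  else
    match lists with
    | [] => 0
    | a0 :: rest => bLenPart (lists.length : Int) lists + bMedLoop a0 0 rest

-- ===== PRECONDITION & SPEC =====
-- Pre_ excludes exactly the inputs containing an empty sublist, on which Python A raises
-- IndexError (indexing the empty list inside `median`); B raises there as well.
def Pre_minMergeCost (lists : List (List Int)) : Prop :=
  ∀ l ∈ lists, l ≠ []
instance (lists : List (List Int)) : Decidable (Pre_minMergeCost lists) := by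
  unfold Pre_minMergeCost; infer_instance

def pvWitness_minMergeCost : List (List Int) := [[1, 2], [5, 2], [3]]

def Spec_minMergeCost (lists : List (List Int)) (out : Int) : Prop := out = minMergeCost_alt lists
instance (lists : List (List Int)) (out : Int) : Decidable (Spec_minMergeCost lists out) := by unfold Spec_minMergeCost; infer_instance

-- ===== CLAIM (what is proved, stated in full; the proofs are below) =====
def Claim_equal_minMergeCost : Prop := ∀ (lists : List (List Int)), Dom_minMergeCost lists → Pre_minMergeCost lists → Spec_minMergeCost lists (minMergeCost lists)

-- ===== LEMMAS AND PROOFS =====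

-- the two median computations pick the same index
theorem med_eq (a : List Int) : aMedian a = bMed a := by
  cases a with
  | nil => decide
  | cons x xs =>
      unfold aMedian bMed
      simp only [List.length_cons]
      set n : Int := (xs.length : Int) with hn
      have hn0 : 0 ≤ n := by positivity
      have hc : ((xs.length + 1 : Nat) : Int) = n + 1 := by push_cast; omega
      rw [hc, PySem.Int.mod_eq_emod_of_pos (a := n + 1) (by omega),
          PySem.Int.floordiv_eq_ediv_of_pos (a := n + 1) (by omega),
          PySem.Int.floordiv_eq_ediv_of_pos (a := n + 1 - 1) (by omega)]
      by_cases h : (n + 1) % 2 = 0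
      · rw [if_neg (by simpa using h)]
        have hidx : (n + 1) / 2 - 1 = (n + 1 - 1) / 2 := by omega
        rw [hidx]
      · rw [if_pos (by simpa using h)]
        have hidx : (n + 1) / 2 = (n + 1 - 1) / 2 := by omega
        rw [hidx]

-- B's stack merge with output accumulator is A's two-pointer merge
theorem merge_eq (a b : List Int) (out : List Int) :
    bMerge out a b = out ++ aMerge a b := by
  induction a generalizing b out with
  | nil => cases b <;> simp [bMerge, aMerge]
  | cons x xs iha =>
      induction b generalizing out with
      | nil => simp [bMerge, aMerge]
      | cons y ys ihb =>
          by_cases h : x ≤ y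
          · rw [aMerge, if_pos h, bMerge, if_pos h, iha (y :: ys) (out ++ [x])]
            simp
          · rw [aMerge, if_neg h, bMerge, if_neg h, ihb (out ++ [y])]
            simp

theorem length_aMerge (a b : List Int) :
    (aMerge a b).length = a.length + b.length := by
  induction a generalizing b with
  | nil => cases b <;> simp [aMerge]
  | cons x xs iha =>
      induction b with
      | nil => simp [aMerge]
      | cons y ys ihb =>
          by_cases h : x ≤ y
          · rw [aMerge, if_pos h]; simp [iha (y :: ys)]; omega
          · rw [aMerge, if_neg h]; simp only [List.length_cons, ihb]; omega

-- proof-side closed form for the length component: each list is weighted by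
-- (number of lists after it) + 1
def wl : List (List Int) → Int
  | [] => 0
  | b :: r => (b.length : Int) * ((r.length : Int) + 1) + wl r

-- shifting bMedLoop's accumulator out
theorem bMedLoop_shift (rest : List (List Int)) (acc : List Int) (m : Int) :
    bMedLoop acc m rest = m + bMedLoop acc 0 rest := by
  induction rest generalizing acc m with
  | nil => simp [bMedLoop]
  | cons b r ih =>
      rw [bMedLoop, bMedLoop, ih, ih (bMerge [] acc b) (0 + _)]
      ring

-- A's loop = closed-form length part + median part
theorem aLoop_split (rest : List (List Int)) (acc : List Int) (c : Int) :
    aLoop (acc :: rest) c =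
      c + (acc.length : Int) * (rest.length : Int) + wl rest + bMedLoop acc 0 rest := by
  induction rest generalizing acc c with
  | nil => rw [aLoop]; simp [wl, bMedLoop]
  | cons b r ih =>
      rw [aLoop, ih, bMedLoop,
          bMedLoop_shift r (bMerge [] acc b) (0 + |bMed acc - bMed b|),
          merge_eq, List.nil_append, wl, med_eq, med_eq, length_aMerge]
      simp only [List.length_cons]
      push_cast
      ring

-- B's enumerate-fold over the tail equals wl (indices start at 1, so the `if` is always the +1 arm)
theorem bLenPart_tail (k : Int) (r : List (List Int)) (j0 s : Int)
    (h1 : 1 ≤ j0) (hk : j0 + (r.length : Int) = k) :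
    (PySem.List.enumerate r j0).foldl
      (fun s jl => s + (jl.2.length : Int) * (k - 1 - jl.1 + (if jl.1 ≠ 0 then 1 else 0))) s
      = s + wl r := by
  induction r generalizing j0 s with
  | nil => simp [PySem.List.enumerate_nil, wl]
  | cons b r ih =>
      simp only [List.length_cons] at hk
      push_cast at hk
      rw [PySem.List.enumerate_cons, List.foldl_cons, wl,
          ih (j0 + 1) _ (by omega) (by omega)]
      rw [if_pos (by omega)]
      have : k - 1 - j0 + 1 = (r.length : Int) + 1 := by omega
      rw [this]; ring

theorem bLenPart_eq (a0 : List Int) (rest : List (List Int)) :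
    bLenPart (((a0 :: rest).length : Nat) : Int) (a0 :: rest)
      = (a0.length : Int) * (rest.length : Int) + wl rest := by
  unfold bLenPart
  rw [PySem.List.enumerate_cons, List.foldl_cons,
      bLenPart_tail _ _ _ _ (by omega) (by simp only [List.length_cons]; push_cast; omega)]
  rw [if_neg (by omega)]
  simp only [List.length_cons]
  push_cast
  ring

-- ===== VERDICT (by name: the statement is the Claim_ definition above) =====
theorem minMergeCost_spec : Claim_equal_minMergeCost := by
  intro lists _ _
  unfold Spec_minMergeCost
  cases lists with
  | nil => simp [minMergeCost, minMergeCost_alt, aLoop]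
  | cons a0 rest =>
      cases rest with
      | nil =>
          have hget : (PySem.List.pyGet? [a0] (0 : Int)).getD ([] : List Int) = a0 := by
            simp [PySem.List.pyGet?, PySem.List.pyIdx?]
          have hmed : (if PySem.Int.mod ((a0.length : Int)) 2 = 0 then
                (PySem.List.pyGet? a0 (PySem.Int.floordiv ((a0.length : Int)) 2 - 1)).getD 0
              else
                (PySem.List.pyGet? a0 (PySem.Int.floordiv ((a0.length : Int)) 2)).getD 0) = bMed a0 := by
            rw [← med_eq]
            unfold aMedian
            by_cases hpar : PySem.Int.mod ((a0.length : Int)) 2 = 0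
            · rw [if_pos hpar, if_neg (by simpa using hpar)]
            · rw [if_neg hpar, if_pos (by simpa using hpar)]
          unfold minMergeCost minMergeCost_alt
          rw [if_pos (by simp), if_neg (by simp), if_pos (by simp)]
          simp only [hget]
          rw [hmed]
      | cons b rest' =>
          unfold minMergeCost minMergeCost_alt
          rw [if_neg (by simp), if_neg (by simp), if_neg (by simp)]
          rw [aLoop_split, bLenPart_eq]
          ring
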